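-- pv_equiv track=rewrite | github.com/098tarik/leetcode-portfolio | Dynamic_Programming/restuarants.py | calculate_ratings
-- ===== SOURCE A (Python) =====
-- def calculate_ratings(ratings):
--     memo = {}
--     n = len(ratings)
--     def max_ratings(i):
--         if i >= n:
--             return 0
--         if i >= n - 2:
--             return ratings[i]  # We know min of future delays is 0
--
--         if i in memo:
--             return memo[i]
--
--          # Choose to stop here + best of next k+1 positions
--         current_rating = ratings[i]
--         max_rating = 0
--         # Can skip to positions i+1, i+2, ..., i+k+1
--         for next_rating in range(i + 2, n):
--             max_rating = max(max_rating, max_ratings(next_rating))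
--
--         memo[i] = current_rating + max_rating
--         return memo[i]
--
--     result = 0
--     for start in range(n):
--         result = max(result, max_ratings(start))
--     return result
-- ===== SOURCE B (Python) =====
-- def calculate_ratings(ratings):
--     # Reverse scan with two running suffix maxima: a = best chain value starting
--     # at any j >= i, b = same for j >= i+2 (None = empty suffix).  O(n) time.
--     a = b = None
--     for r in reversed(ratings):
--         f = r + (b if b is not None and b > 0 else 0)
--         a, b = (f if a is None else max(f, a)), a
--     return a if a is not None and a > 0 else 0
-- ===== Notes on version B (the rewrite author's own statement) =====
-- stated objective: faster
-- what changed: Replaced the memoized top-down recursion with an inner rescan over all later positions (plus an outer loop re-calling it for every start) by a single reverse pass that keeps two running suffix maxima of the chain values.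
import Mathlib
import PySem

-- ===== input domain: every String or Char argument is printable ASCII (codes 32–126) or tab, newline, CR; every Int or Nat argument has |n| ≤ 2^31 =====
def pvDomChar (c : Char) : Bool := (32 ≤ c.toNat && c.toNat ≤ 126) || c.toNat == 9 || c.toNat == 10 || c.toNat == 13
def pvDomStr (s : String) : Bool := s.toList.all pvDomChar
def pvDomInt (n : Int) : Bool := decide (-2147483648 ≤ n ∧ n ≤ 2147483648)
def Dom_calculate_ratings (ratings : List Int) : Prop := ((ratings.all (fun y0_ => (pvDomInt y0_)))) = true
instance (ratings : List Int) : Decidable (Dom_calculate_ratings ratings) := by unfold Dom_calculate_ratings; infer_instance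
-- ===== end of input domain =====

-- B replaces A's memoized O(n^2) recursion by a single reverse scan keeping two
-- running suffix maxima (objective: faster, asymptotic O(n) vs O(n^2)).

-- ===== PORT A =====
-- A's inner recursive max_ratings (with its memo dict) and its for-loop over
-- range(i+2, n), transliterated as a mutual pair; termination measure n - i.
mutual
def pvMaxRatingsA (r : List Int) (n : Int) (i : Int) (memo : PySem.Dict Int Int) :
    Int × PySem.Dict Int Int :=
  if i ≥ n then (0, memo)
  else if i ≥ n - 2 then ((PySem.List.pyGet? r i).getD 0, memo)  -- ratings[i]; always in range here
  else
    match memo.get? i with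
    | some v => (v, memo)                          -- if i in memo: return memo[i]
    | none =>
      let current := (PySem.List.pyGet? r i).getD 0  -- ratings[i]; always in range here
      let p := pvLoopA r n (i + 2) 0 memo            -- for next_rating in range(i+2, n): ...
      let res := current + p.1
      (res, p.2.insert i res)                        -- memo[i] = ...; return memo[i]
termination_by 2 * (n - i).toNat
decreasing_by omega

def pvLoopA (r : List Int) (n : Int) (j : Int) (acc : Int) (memo : PySem.Dict Int Int) :
    Int × PySem.Dict Int Int :=
  if j < n then
    let q := pvMaxRatingsA r n j memo
    pvLoopA r n (j + 1) (max acc q.1) q.2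
  else (acc, memo)
termination_by 2 * (n - j).toNat + 1
decreasing_by
  · omega
  · omega
end

def calculate_ratings (ratings : List Int) : Int :=
  let n : Int := ratings.length
  ((PySem.List.pyRange 0 n 1).foldl
    (fun (st : Int × PySem.Dict Int Int) start =>
      let q := pvMaxRatingsA ratings n start st.2
      (max st.1 q.1, q.2))
    (0, (PySem.Dict.empty : PySem.Dict Int Int))).1

-- ===== PORT B =====
-- B's loop body: f = r + (b if b is not None and b > 0 else 0);
--                a, b = (f if a is None else max(f, a)), a
def pvStepB (st : Option Int × Option Int) (r : Int) : Option Int × Option Int :=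
  let f := r + (match st.2 with | some b => if b > 0 then b else 0 | none => 0)
  ((match st.1 with | none => some f | some a => some (max f a)), st.1)

def calculate_ratings_alt (ratings : List Int) : Int :=
  match (ratings.reverse.foldl pvStepB (none, none)).1 with
  | some a => if a > 0 then a else 0
  | none => 0

-- ===== PRECONDITION & SPEC =====
def Spec_calculate_ratings (ratings : List Int) (out : Int) : Prop := out = calculate_ratings_alt ratings
instance (ratings : List Int) (out : Int) : Decidable (Spec_calculate_ratings ratings out) := by unfold Spec_calculate_ratings; infer_instance

-- ===== CLAIM (what is proved, stated in full; the proofs are below) =====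
def Claim_equal_calculate_ratings : Prop := ∀ (ratings : List Int), Dom_calculate_ratings ratings → Spec_calculate_ratings ratings (calculate_ratings ratings)

-- ===== LEMMAS AND PROOFS =====

-- Reference value: pvD s = (M, M') where M  = max(0, best chain value starting in s)
--                                     M' = max(0, best chain value starting in s.tail)
def pvD : List Int → Int × Int
  | [] => (0, 0)
  | x :: rest =>
    let p := pvD rest
    (max (x + p.2) p.1, p.1)

lemma pvD_snd (s : List Int) : (pvD s).2 = (pvD s.tail).1 := by
  cases s <;> simp [pvD]

lemma pvD_nonneg (s : List Int) : 0 ≤ (pvD s).1 := by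
  induction s with
  | nil => simp [pvD]
  | cons x rest ih => simp [pvD]; omega

def pvM (r : List Int) (k : Nat) : Int := (pvD (r.drop k)).1
def pvG (r : List Int) (k : Nat) : Int := r.getD k 0 + pvM r (k + 2)

lemma pvM_nonneg (r : List Int) (k : Nat) : 0 ≤ pvM r k := pvD_nonneg _

lemma pvM_stop (r : List Int) (k : Nat) (h : r.length ≤ k) : pvM r k = 0 := by
  unfold pvM
  rw [List.drop_eq_nil_of_le h]
  simp [pvD]

lemma pvM_unfold (r : List Int) (k : Nat) (h : k < r.length) :
    pvM r k = max (pvG r k) (pvM r (k + 1)) := by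
  unfold pvM pvG pvM
  rw [List.drop_eq_getElem_cons h]
  show (pvD (r[k] :: r.drop (k+1))).1 = _
  have h2 : (pvD (r.drop (k+1))).2 = (pvD (r.drop (k+2))).1 := by
    rw [pvD_snd, List.tail_drop]
  simp [pvD, h2, List.getD_eq_getElem?_getD, List.getElem?_eq_getElem h]

-- ---- A-side ----

def pvInv (r : List Int) (memo : PySem.Dict Int Int) : Prop :=
  ∀ k v, memo.get? k = some v → v = pvG r k.toNat

lemma pv_ratings_get (r : List Int) (i : Int) (h : 0 ≤ i) :
    ((PySem.List.pyGet? r i).getD 0) = r.getD i.toNat 0 := by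
  rw [PySem.List.pyGet?_of_nonneg r h, List.getD_eq_getElem?_getD]

-- joint correctness of the memoized recursion + its inner loop, by strong
-- induction on the termination measure
lemma pvA_main (r : List Int) : ∀ N : Nat,
    (∀ i memo, 2 * ((r.length : Int) - i).toNat ≤ N → 0 ≤ i → pvInv r memo →
      (pvMaxRatingsA r r.length i memo).1
          = (if i < (r.length : Int) then pvG r i.toNat else 0)
        ∧ pvInv r (pvMaxRatingsA r r.length i memo).2)
    ∧ (∀ j acc memo, 2 * ((r.length : Int) - j).toNat + 1 ≤ N → 0 ≤ j → 0 ≤ acc →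
        pvInv r memo →
      (pvLoopA r r.length j acc memo).1 = max acc (pvM r j.toNat)
        ∧ pvInv r (pvLoopA r r.length j acc memo).2) := by
  intro N
  induction N using Nat.strong_induction_on with
  | _ N IH =>
    constructor
    · intro i memo hm hi hinv
      rw [pvMaxRatingsA]
      by_cases h1 : i ≥ (r.length : Int)
      · simp only [if_pos h1]
        have : ¬ i < (r.length : Int) := by omega
        simp [this, hinv]
      · simp only [if_neg h1]
        by_cases h2 : i ≥ (r.length : Int) - 2
        · simp only [if_pos h2]
          have hlt : i < (r.length : Int) := by omega
          have hstop : pvM r (i.toNat + 2) = 0 := pvM_stop _ _ (by omega)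
          constructor
          · rw [if_pos hlt, pv_ratings_get r i hi]
            unfold pvG; omega
          · exact hinv
        · simp only [if_neg h2]
          have hlt : i < (r.length : Int) := by omega
          cases hget : memo.get? i with
          | some v =>
            simp only
            constructor
            · rw [if_pos hlt]; exact hinv i v hget
            · exact hinv
          | none =>
            simp only
            have hmeas : 2 * ((r.length : Int) - (i + 2)).toNat + 1 < N := by omega
            have hloop := (IH _ hmeas).2 (i + 2) 0 memo (by omega) (by omega) le_rfl hinv
            set p := pvLoopA r (↑r.length) (i + 2) 0 memo with hp
            have hp1 : p.1 = pvM r (i + 2).toNat := by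
              rw [hloop.1]
              have := pvM_nonneg r (i + 2).toNat
              omega
            have htn : (i + 2).toNat = i.toNat + 2 := by omega
            have hres : ((PySem.List.pyGet? r i).getD 0) + p.1 = pvG r i.toNat := by
              rw [pv_ratings_get r i hi, hp1, htn]; rfl
            constructor
            · rw [if_pos hlt]; exact hres
            · intro k v hkv
              rw [PySem.Dict.get?_insert] at hkv
              by_cases hk : k = i
              · rw [if_pos hk] at hkv
                have : v = (PySem.List.pyGet? r i).getD 0 + p.1 := by
                  injection hkv with h; omega
                rw [this, hres, hk]
              · rw [if_neg hk] at hkv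
                exact hloop.2 k v hkv
    · intro j acc memo hm hj hacc hinv
      rw [pvLoopA]
      by_cases h1 : j < (r.length : Int)
      · simp only [if_pos h1]
        have hq := (IH _ (by omega : 2 * ((r.length : Int) - j).toNat < N)).1
          j memo le_rfl hj hinv
        set q := pvMaxRatingsA r (↑r.length) j memo with hqdef
        have hq1 : q.1 = pvG r j.toNat := by rw [hq.1, if_pos h1]
        have hrec := (IH _ (by omega : 2 * ((r.length : Int) - (j + 1)).toNat + 1 < N)).2
          (j + 1) (max acc q.1) q.2 (by omega) (by omega) (by omega) hq.2
        constructor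
        · rw [hrec.1, hq1]
          have hun := pvM_unfold r j.toNat (by omega)
          have htn : (j + 1).toNat = j.toNat + 1 := by omega
          rw [htn]
          omega
        · exact hrec.2
      · simp only [if_neg h1]
        constructor
        · have : pvM r j.toNat = 0 := pvM_stop _ _ (by omega)
          omega
        · exact hinv

-- the outer 'for start in range(n)' loop is pointwise the same fold as pvLoopA
lemma pv_outer_eq_loop (r : List Int) : ∀ (k : Nat) (a : Int) (acc : Int)
    (memo : PySem.Dict Int Int), ((r.length : Int) - a).toNat ≤ k →
    ((PySem.List.pyRange a r.length 1).foldl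
      (fun (st : Int × PySem.Dict Int Int) start =>
        let q := pvMaxRatingsA r r.length start st.2
        (max st.1 q.1, q.2)) (acc, memo))
      = pvLoopA r r.length a acc memo := by
  intro k
  induction k with
  | zero =>
    intro a acc memo hk
    rw [PySem.List.pyRange_one_eq_nil (by omega), pvLoopA, if_neg (by omega)]
    rfl
  | succ k ih =>
    intro a acc memo hk
    by_cases h : a < (r.length : Int)
    · rw [PySem.List.pyRange_one_cons h, List.foldl_cons, pvLoopA, if_pos h]
      exact ih (a + 1) _ _ (by omega)
    · rw [PySem.List.pyRange_one_eq_nil (by omega), pvLoopA, if_neg h]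
      rfl

lemma pvInv_empty (r : List Int) : pvInv r (PySem.Dict.empty : PySem.Dict Int Int) := by
  intro k v h
  rw [PySem.Dict.get?_empty] at h
  exact absurd h (by simp)

lemma pvA_eq (r : List Int) : calculate_ratings r = (pvD r).1 := by
  show ((PySem.List.pyRange 0 (r.length : Int) 1).foldl
    (fun (st : Int × PySem.Dict Int Int) start =>
      let q := pvMaxRatingsA r (r.length : Int) start st.2
      (max st.1 q.1, q.2))
    (0, (PySem.Dict.empty : PySem.Dict Int Int))).1 = (pvD r).1
  rw [pv_outer_eq_loop r ((r.length : Int) - 0).toNat 0 0 _ le_rfl]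
  have h := (pvA_main r (2 * ((r.length : Int) - 0).toNat + 1)).2 0 0
    PySem.Dict.empty le_rfl le_rfl le_rfl (pvInv_empty r)
  rw [h.1]
  have h0 : pvM r ((0 : Int)).toNat = (pvD r).1 := by unfold pvM; rfl
  have := pvD_nonneg r
  omega

-- ---- B-side ----

def pvE : List Int → Option Int × Option Int
  | [] => (none, none)
  | x :: rest => pvStepB (pvE rest) x

lemma pvE_eq_foldl (s : List Int) :
    s.reverse.foldl pvStepB (none, none) = pvE s := by
  induction s with
  | nil => rfl
  | cons x rest ih =>
    rw [List.reverse_cons, List.foldl_append, ih]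
    rfl

def pvOpt0 : Option Int → Int
  | none => 0
  | some a => max 0 a

lemma pvStep_spec (a b : Option Int) (x m1 m2 : Int) (h1 : pvOpt0 a = m1)
    (h2 : pvOpt0 b = m2) :
    pvOpt0 (pvStepB (a, b) x).1 = max (x + m2) m1 ∧ (pvStepB (a, b) x).2 = a := by
  subst h1 h2
  cases a <;> cases b <;>
    (refine ⟨?_, rfl⟩; simp only [pvStepB, pvOpt0]) <;> (try split_ifs) <;> omega

lemma pvE_inv (s : List Int) :
    pvOpt0 (pvE s).1 = (pvD s).1 ∧ pvOpt0 (pvE s).2 = (pvD s).2 := by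
  induction s with
  | nil => simp [pvE, pvD, pvOpt0]
  | cons x rest ih =>
    obtain ⟨ih1, ih2⟩ := ih
    have hstep := pvStep_spec (pvE rest).1 (pvE rest).2 x _ _ ih1 ih2
    have hE : pvE (x :: rest) = pvStepB ((pvE rest).1, (pvE rest).2) x := rfl
    constructor
    · rw [hE, hstep.1]
      simp [pvD]
    · rw [hE, hstep.2, ih1]
      simp [pvD]

lemma pvB_eq (r : List Int) : calculate_ratings_alt r = (pvD r).1 := by
  unfold calculate_ratings_alt
  rw [pvE_eq_foldl]
  have h := (pvE_inv r).1
  rcases h1 : (pvE r).1 with _ | a <;> rw [h1] at h <;>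
    simp only [pvOpt0] at h <;> simp only []
  · exact h
  · split_ifs <;> omega

-- ===== VERDICT (by name: the statement is the Claim_ definition above) =====
theorem calculate_ratings_spec : Claim_equal_calculate_ratings := by
  intro ratings _
  unfold Spec_calculate_ratings
  rw [pvA_eq, pvB_eq]
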